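-- pv_equiv track=rewrite | github.com/kaisergrimlock/anaconda_research_project | scripts/inject/inject_eng.py | find_between_word_positions
-- ===== SOURCE A (Python) =====
-- def find_between_word_positions(text: str):
--     """Return insertion indices that place content BETWEEN words (never slicing a token)."""
--     positions = []
--     i, n = 0, len(text)
--     while i < n:
--         if text[i].isspace():
--             j = i
--             while j < n and text[j].isspace():
--                 j += 1
--             if i > 0 and j < n and not text[i-1].isspace() and not text[j].isspace():
--                 positions.append(j)
--             i = j
--         else:
--             i += 1
--     return positions
-- ===== SOURCE B (Python) =====
-- def find_between_word_positions(text: str):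
--     """Return insertion indices that place content BETWEEN words (never slicing a token)."""
--     positions = []
--     seen_nonspace = False
--     for i, ch in enumerate(text):
--         if not ch.isspace():
--             if i > 0 and text[i - 1].isspace() and seen_nonspace:
--                 positions.append(i)
--             seen_nonspace = True
--     return positions
-- ===== Notes on version B (the rewrite author's own statement) =====
-- stated objective: idiomatic
-- what changed: Replaced A's outer loop with an inner whitespace-run-skipping while by a single uniform character-by-character scan that detects word starts directly, carrying a seen_nonspace boolean instead of computing run ends.
import Mathlib
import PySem

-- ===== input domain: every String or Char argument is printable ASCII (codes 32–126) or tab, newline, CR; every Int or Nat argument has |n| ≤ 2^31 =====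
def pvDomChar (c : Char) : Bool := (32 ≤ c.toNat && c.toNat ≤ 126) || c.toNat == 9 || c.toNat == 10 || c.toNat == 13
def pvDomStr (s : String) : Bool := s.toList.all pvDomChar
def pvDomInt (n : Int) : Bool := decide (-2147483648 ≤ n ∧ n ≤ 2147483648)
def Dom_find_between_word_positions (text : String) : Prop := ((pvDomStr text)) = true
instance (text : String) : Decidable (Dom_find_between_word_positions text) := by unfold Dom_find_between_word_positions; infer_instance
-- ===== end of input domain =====

-- B replaces A's outer-loop-with-inner-run-skipping-while by a single uniform character scan
-- carrying a seen_nonspace boolean; same O(n) cost, simpler decomposition.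

-- ===== PORT A =====
-- inner `while j < n and text[j].isspace(): j += 1` over the suffix at j; returns (text[j:], j)
def pvSkipRun : List Char → Int → (List Char × Int)
  | [], j => ([], j)
  | c :: rest, j => if PySem.Chars.isspace c then pvSkipRun rest (j + 1) else (c :: rest, j)

-- port cites this for termination of the outer loop
theorem pvSkipRun_len (cs : List Char) (j : Int) : (pvSkipRun cs j).1.length ≤ cs.length := by
  induction cs generalizing j with
  | nil => simp [pvSkipRun]
  | cons c rest ih =>
    simp only [pvSkipRun]
    split
    · exact Nat.le_succ_of_le (ih (j + 1))
    · simp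

-- A's outer while loop; `prevSp` is `text[i-1].isspace()` (none at i = 0);
-- the run case tests `j < n and not text[j].isspace()` as head? of the suffix text[j:].
def pvLoopA : List Char → Int → Option Bool → List Int
  | [], _, _ => []
  | c :: rest, i, prevSp =>
    if hc : PySem.Chars.isspace c = true then
      let p := pvSkipRun (c :: rest) i
      (if 0 < i ∧ prevSp = some false ∧ p.1.head?.elim false (fun d => !PySem.Chars.isspace d) = true
       then [p.2] else []) ++ pvLoopA p.1 p.2 (some true)
    else pvLoopA rest (i + 1) (some false)
termination_by cs => cs.length
decreasing_by
  · simp only [pvSkipRun, hc, if_pos]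
    exact Nat.lt_succ_of_le (pvSkipRun_len rest (i + 1))
  · simp

def find_between_word_positions (text : String) : List Int :=
  pvLoopA text.toList 0 none

-- ===== PORT B =====
-- single scan with enumerate; `seen` is seen_nonspace, `prevSp` is `text[i-1].isspace()` (none at i = 0)
def pvLoopB : List Char → Int → Bool → Option Bool → List Int
  | [], _, _, _ => []
  | c :: rest, i, seen, prevSp =>
    if PySem.Chars.isspace c then
      pvLoopB rest (i + 1) seen (some true)
    else
      (if 0 < i ∧ prevSp = some true ∧ seen = true then [i] else [])
        ++ pvLoopB rest (i + 1) true (some false)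

def find_between_word_positions_alt (text : String) : List Int :=
  pvLoopB text.toList 0 false none

-- ===== PRECONDITION & SPEC =====
def Spec_find_between_word_positions (text : String) (out : List Int) : Prop := out = find_between_word_positions_alt text
instance (text : String) (out : List Int) : Decidable (Spec_find_between_word_positions text out) := by unfold Spec_find_between_word_positions; infer_instance

-- ===== CLAIM (what is proved, stated in full; the proofs are below) =====
def Claim_equal_find_between_word_positions : Prop := ∀ (text : String), Dom_find_between_word_positions text → Spec_find_between_word_positions text (find_between_word_positions text)

-- ===== LEMMAS AND PROOFS =====

theorem pvSkipRun_ge (cs : List Char) (j : Int) : j ≤ (pvSkipRun cs j).2 := by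
  induction cs generalizing j with
  | nil => simp [pvSkipRun]
  | cons c rest ih =>
    simp only [pvSkipRun]
    split
    · exact le_trans (by omega) (ih (j + 1))
    · simp

theorem pvSkipRun_head (cs : List Char) (j : Int) {d : Char} {ds : List Char}
    (h : (pvSkipRun cs j).1 = d :: ds) : PySem.Chars.isspace d = false := by
  induction cs generalizing j with
  | nil => simp [pvSkipRun] at h
  | cons c rest ih =>
    simp only [pvSkipRun] at h
    split at h
    · exact ih (j + 1) h
    · next hc =>
      obtain ⟨rfl, rfl⟩ : c = d ∧ rest = ds := by simpa using h
      simpa using hc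

-- B's walk over a whitespace run, summarised by pvSkipRun
theorem pvRunB (cs : List Char) (i : Int) (seen : Bool) (hi : 0 < i) :
    pvLoopB cs i seen (some true) =
      (match pvSkipRun cs i with
       | ([], _) => []
       | (_ :: ds, j) => (if seen = true then [j] else []) ++ pvLoopB ds (j + 1) true (some false)) := by
  induction cs generalizing i with
  | nil => simp [pvLoopB, pvSkipRun]
  | cons c rest ih =>
    by_cases hc : PySem.Chars.isspace c = true
    · rw [show pvLoopB (c :: rest) i seen (some true) = pvLoopB rest (i + 1) seen (some true) by
        simp [pvLoopB, hc]]
      rw [ih (i + 1) (by omega)]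
      simp [pvSkipRun, hc]
    · simp [pvLoopB, pvSkipRun, hc, hi]

theorem pvMain (n : Nat) : ∀ (cs : List Char), cs.length ≤ n →
    ∀ (i : Int) (prevSp : Option Bool) (seen : Bool),
    ((i = 0 ∧ prevSp = none ∧ seen = false) ∨ (0 < i ∧ prevSp = some false ∧ seen = true)) →
    pvLoopA cs i prevSp = pvLoopB cs i seen prevSp := by
  induction n with
  | zero =>
    intro cs hlen i prevSp seen _
    have : cs = [] := List.eq_nil_of_length_eq_zero (Nat.le_zero.mp hlen)
    subst this; simp [pvLoopA, pvLoopB]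
  | succ n ih =>
    intro cs hlen i prevSp seen hstate
    match cs with
    | [] => simp [pvLoopA, pvLoopB]
    | c :: rest =>
      by_cases hc : PySem.Chars.isspace c = true
      · -- run case
        rw [show pvLoopB (c :: rest) i seen prevSp = pvLoopB rest (i + 1) seen (some true) by
          simp [pvLoopB, hc]]
        have hi0 : 0 ≤ i := by rcases hstate with ⟨h1, _, _⟩ | ⟨h1, _, _⟩ <;> omega
        rw [pvRunB rest (i + 1) seen (by omega)]
        rw [pvLoopA]
        simp only [hc, dif_pos]
        have hps : pvSkipRun (c :: rest) i = pvSkipRun rest (i + 1) := by simp [pvSkipRun, hc]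
        rw [hps]
        have hj := pvSkipRun_ge rest (i + 1)
        have hl := pvSkipRun_len rest (i + 1)
        cases hE : pvSkipRun rest (i + 1) with
        | mk tail j =>
          rw [hE] at hj hl
          simp only at hj hl
          rcases tail with _ | ⟨d, ds⟩
          · simp [pvLoopA]
          · have hd : PySem.Chars.isspace d = false := pvSkipRun_head rest (i + 1) (by rw [hE])
            have hds : ds.length ≤ n := by simp at hl hlen; omega
            have hcont : pvLoopA (d :: ds) j (some true) = pvLoopA ds (j + 1) (some false) := by
              rw [pvLoopA]; simp [hd]
            rcases hstate with ⟨hi, hp, hs⟩ | ⟨hi, hp, hs⟩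
            · subst hi hp hs
              simp only [hcont]
              rw [if_neg (by simp), if_neg (by simp), List.nil_append, List.nil_append]
              exact ih ds hds _ _ _ (Or.inr ⟨by omega, rfl, rfl⟩)
            · subst hp hs
              simp only [hcont]
              have hrec := ih ds hds (j + 1) (some false) true (Or.inr ⟨by omega, rfl, rfl⟩)
              simp [hd, hi, hrec]
      · -- non-space character
        rw [pvLoopA]
        simp only [hc]
        rw [show pvLoopB (c :: rest) i seen prevSp
            = (if 0 < i ∧ prevSp = some true ∧ seen = true then [i] else [])
              ++ pvLoopB rest (i + 1) true (some false) by simp [pvLoopB, hc]]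
        have hgate : ¬(0 < i ∧ prevSp = some true ∧ seen = true) := by
          rcases hstate with ⟨_, hp, _⟩ | ⟨_, hp, _⟩ <;> simp [hp]
        rw [if_neg hgate, List.nil_append]
        have hi1 : 0 < i + 1 := by rcases hstate with ⟨h1, _, _⟩ | ⟨h1, _, _⟩ <;> omega
        exact (by simp at hlen; exact ih rest (by omega) _ _ _ (Or.inr ⟨hi1, rfl, rfl⟩) : _)

-- ===== VERDICT (by name: the statement is the Claim_ definition above) =====
theorem find_between_word_positions_spec : Claim_equal_find_between_word_positions := by
  intro text _
  unfold Spec_find_between_word_positions find_between_word_positions find_between_word_positions_alt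
  exact pvMain text.toList.length text.toList le_rfl 0 none false (Or.inl ⟨rfl, rfl, rfl⟩)
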